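-- pv_equiv track=rewrite | github.com/peppelinux/Django-snippets | datetime_heuristic_parser.py | datetime_regexp_builder
-- ===== SOURCE A (Python) =====
-- DATETIME_ELEMENTS_REGEXP = {'%Y': '(?P<year>\d{4})',
--                             '%y': '(?P<year>\d{2})',
--                             '%m': '(?P<month>\d{1,2})',
--                             '%d': '(?P<day>\d{1,2})',
--                             '%H': '(?P<hour>\d{1,2})',
--                             '%M': '(?P<minute>\d{1,2})',
--                             '%S': '(?P<second>\d{1,2})',
--                             '%f': '(?P<microsecond>\d{6})',
--                             '%z': '(?P<tzinfo>(Z)|([\sz\+\-]*)?[\d:]+)',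
--                             # '%Z': EST, UTC... many others to do,
--                             } # ...
--
-- def datetime_regexp_builder(formats):
--     """
--     formats = DATE_FORMAT of DATETIME_FORMAT
--     """
--     regexp_dict = {}
--     for df in formats:
--         df_regexp = df
--         for k,v in DATETIME_ELEMENTS_REGEXP.items():
--             df_regexp = df_regexp.replace(k,v)
--         regvalue = df_regexp+'$'
--         regexp_dict[df] = regvalue
--     return regexp_dict
-- ===== SOURCE B (Python) =====
-- DATETIME_ELEMENTS_REGEXP = {'%Y': '(?P<year>\d{4})',
--                             '%y': '(?P<year>\d{2})',
--                             '%m': '(?P<month>\d{1,2})',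
--                             '%d': '(?P<day>\d{1,2})',
--                             '%H': '(?P<hour>\d{1,2})',
--                             '%M': '(?P<minute>\d{1,2})',
--                             '%S': '(?P<second>\d{1,2})',
--                             '%f': '(?P<microsecond>\d{6})',
--                             '%z': '(?P<tzinfo>(Z)|([\sz\+\-]*)?[\d:]+)',
--                             }
--
--
-- def datetime_regexp_builder(formats):
--     """One-pass scanner: each format is translated in a single left-to-right
--     sweep driven by a dict lookup, instead of nine sequential str.replace passes."""
--     regexp_dict = {}
--     for df in formats:
--         parts = []
--         i = 0
--         n = len(df)
--         while i < n:
--             tok = df[i:i + 2]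
--             if tok in DATETIME_ELEMENTS_REGEXP:
--                 parts.append(DATETIME_ELEMENTS_REGEXP[tok])
--                 i += 2
--             else:
--                 parts.append(df[i])
--                 i += 1
--         parts.append('$')
--         regexp_dict[df] = ''.join(parts)
--     return regexp_dict
-- ===== Notes on version B (the rewrite author's own statement) =====
-- stated objective: alternative
-- what changed: Each format string is translated in a single left-to-right scan with a token-table lookup (emitting either a table value or the current character), instead of A's nine sequential full str.replace passes over the string.
import Mathlib
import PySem

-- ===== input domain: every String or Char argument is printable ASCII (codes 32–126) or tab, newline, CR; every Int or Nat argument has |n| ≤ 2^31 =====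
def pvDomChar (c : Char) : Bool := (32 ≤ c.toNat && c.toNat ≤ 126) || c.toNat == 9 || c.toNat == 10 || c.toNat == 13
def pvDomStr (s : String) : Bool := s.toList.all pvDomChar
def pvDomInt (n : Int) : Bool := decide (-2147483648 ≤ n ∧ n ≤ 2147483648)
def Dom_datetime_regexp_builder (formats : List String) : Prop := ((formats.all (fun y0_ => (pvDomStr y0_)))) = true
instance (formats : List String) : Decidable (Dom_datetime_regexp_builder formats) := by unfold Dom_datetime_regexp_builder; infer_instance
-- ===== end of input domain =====

-- B replaces A's nine sequential str.replace passes per format string by a single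
-- left-to-right scan driven by a token-table lookup (objective: alternative, same cost class).


-- ===== PORT A =====
-- DATETIME_ELEMENTS_REGEXP, in insertion order
def pvTableA : List (String × String) := [("%Y", "(?P<year>\\d{4})"), ("%y", "(?P<year>\\d{2})"), ("%m", "(?P<month>\\d{1,2})"), ("%d", "(?P<day>\\d{1,2})"), ("%H", "(?P<hour>\\d{1,2})"), ("%M", "(?P<minute>\\d{1,2})"), ("%S", "(?P<second>\\d{1,2})"), ("%f", "(?P<microsecond>\\d{6})"), ("%z", "(?P<tzinfo>(Z)|([\\sz\\+\\-]*)?[\\d:]+)")]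

-- A: for each df, fold the nine str.replace passes (on the code-point lists, via
-- PySem.Chars.replace = PySem.Str.replace's own definition), append '$', insert into the dict.
def datetime_regexp_builder (formats : List String) : List (String × String) :=
  (formats.foldl
    (fun d df =>
      d.insert df (String.ofList
        ((pvTableA.foldl (fun acc kv => PySem.Chars.replace acc kv.1.toList kv.2.toList) df.toList)
          ++ ['$'])))
    (PySem.Dict.empty : PySem.Dict String String)).items

-- ===== PORT B =====
-- the same table, keyed by the letter after '%'
def pvTokenTable : List (Char × List Char) := [('Y', "(?P<year>\\d{4})".toList), ('y', "(?P<year>\\d{2})".toList), ('m', "(?P<month>\\d{1,2})".toList), ('d', "(?P<day>\\d{1,2})".toList), ('H', "(?P<hour>\\d{1,2})".toList), ('M', "(?P<minute>\\d{1,2})".toList), ('S', "(?P<second>\\d{1,2})".toList), ('f', "(?P<microsecond>\\d{6})".toList), ('z', "(?P<tzinfo>(Z)|([\\sz\\+\\-]*)?[\\d:]+)".toList)]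

-- 'tok = df[i:i+2]; tok in table' of Source B: the two-char window (x, next char) looked up in T
def pvLookup (T : List (Char × List Char)) (x : Char) (h? : Option Char) : Option (List Char) :=
  if x = '%' then
    match h? with
    | some y => (T.find? (fun p => p.1 == y)).map (·.2)
    | none => none
  else none

-- Source B's while loop over i, as recursion over the remaining suffix of the string
def pvTr (T : List (Char × List Char)) : List Char → List Char
  | [] => []
  | x :: t =>
    match pvLookup T x t.head? with
    | some v => v ++ pvTr T (t.drop 1)
    | none => x :: pvTr T t
  termination_by s => s.length
  decreasing_by
  · simp only [List.length_drop, List.length_cons]; omega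
  · simp

-- B: one scan per format, then '$' appended ('parts.append('$'); ''.join(parts)')
def datetime_regexp_builder_alt (formats : List String) : List (String × String) :=
  (formats.foldl
    (fun d df => d.insert df (String.ofList (pvTr pvTokenTable df.toList ++ ['$'])))
    (PySem.Dict.empty : PySem.Dict String String)).items

-- ===== PRECONDITION & SPEC =====
def Spec_datetime_regexp_builder (formats : List String) (out : List (String × String)) : Prop := out = datetime_regexp_builder_alt formats
instance (formats : List String) (out : List (String × String)) : Decidable (Spec_datetime_regexp_builder formats out) := by unfold Spec_datetime_regexp_builder; infer_instance

-- ===== CLAIM (what is proved, stated in full; the proofs are below) =====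
def Claim_equal_datetime_regexp_builder : Prop := ∀ (formats : List String), Dom_datetime_regexp_builder formats → Spec_datetime_regexp_builder formats (datetime_regexp_builder formats)

-- ===== LEMMAS AND PROOFS =====

-- one str.replace pass with a two-char pattern '%c', as plain structural recursion
def pvRep1 (c : Char) (v : List Char) : List Char → List Char
  | [] => []
  | x :: t =>
    if x = '%' ∧ t.head? = some c then v ++ pvRep1 c v (t.drop 1) else x :: pvRep1 c v t
  termination_by s => s.length
  decreasing_by
  · simp only [List.length_drop, List.length_cons]; omega
  · simp

theorem pvGo_spec (c : Char) (v : List Char) :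
    ∀ (fuel : Nat) (l acc : List Char), l.length ≤ fuel →
      PySem.Chars.replace.go ['%', c] v fuel l acc = acc.reverse ++ pvRep1 c v l := by
  intro fuel
  induction fuel with
  | zero =>
    intro l acc hl
    have : l = [] := by cases l <;> simp_all
    subst this
    rw [PySem.Chars.replace.go]
    simp [pvRep1]
  | succ n ih =>
    intro l acc hl
    cases l with
    | nil =>
      rw [PySem.Chars.replace.go]
      simp [pvRep1]
      omega
    | cons x t =>
      rw [PySem.Chars.replace.go]
      by_cases hpre : (['%', c]).isPrefixOf (x :: t) = true
      · have hx : x = '%' ∧ t.head? = some c := by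
          cases t with
          | nil => simp [List.isPrefixOf] at hpre
          | cons y t' =>
            simp only [List.isPrefixOf, Bool.and_true,
              Bool.and_eq_true, beq_iff_eq] at hpre
            exact ⟨hpre.1.symm, by simp [hpre.2]⟩
        rw [if_pos hpre, ih _ _ (by simp at hl ⊢; cases t <;> simp_all <;> omega)]
        rw [pvRep1, if_pos hx]
        cases t with
        | nil => simp_all
        | cons y t' => simp
      · have hx : ¬ (x = '%' ∧ t.head? = some c) := by
          intro ⟨h1, h2⟩
          apply hpre
          cases t with
          | nil => simp at h2
          | cons y t' => simp at h2; simp [List.isPrefixOf, h1, h2]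
        rw [if_neg hpre, ih _ _ (by simp at hl ⊢; omega)]
        rw [pvRep1, if_neg hx]
        simp

theorem pvReplace_eq_rep1 (c : Char) (v : List Char) (l : List Char) :
    PySem.Chars.replace l ['%', c] v = pvRep1 c v l := by
  rw [PySem.Chars.replace]
  simp only [List.isEmpty_cons, Bool.false_eq_true, if_false]
  rw [pvGo_spec c v l.length l [] le_rfl]
  simp

-- the empty table scans without changing anything
theorem pvTr_nil (s : List Char) : pvTr [] s = s := by
  induction s using pvTr.induct [] with
  | case1 => rw [pvTr]
  | case2 x t v hv ih =>
    exfalso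
    unfold pvLookup at hv
    revert hv
    cases t.head? <;> (split <;> simp)
  | case3 x t hv ih => rw [pvTr, hv]; simp [ih]

-- a '%'-free chunk passes through a scan untouched
theorem pvTr_append_nopct (T : List (Char × List Char)) (a : List Char)
    (ha : ∀ ch ∈ a, ch ≠ '%') : ∀ x, pvTr T (a ++ x) = a ++ pvTr T x := by
  induction a with
  | nil => simp
  | cons c a' ih =>
    intro x
    have hc : c ≠ '%' := ha c (by simp)
    rw [List.cons_append, pvTr]
    have : pvLookup T c ((a' ++ x).head?) = none := by simp [pvLookup, hc]
    rw [this]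
    simp only [List.cons_append, List.cons.injEq, true_and]
    exact ih (fun ch h => ha ch (by simp [h])) x

-- the conditions the actual table satisfies, suffix by suffix
def pvGood : List (Char × List Char) → Prop
  | [] => True
  | (c, v) :: R =>
      c ≠ '%' ∧ (∀ ch ∈ v, ch ≠ '%') ∧ v ≠ [] ∧
      (∀ p ∈ R, v.head? ≠ some p.1) ∧ (∀ p ∈ R, p.1 ≠ '%') ∧ pvGood R

-- head of one replace pass: the string is only rewritten at a '%c' match
theorem pvRep1_head (c : Char) (v : List Char) (hv : v ≠ []) (y : Char) (t : List Char) :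
    (pvRep1 c v (y :: t)).head? =
      (if y = '%' ∧ t.head? = some c then v.head? else some y) := by
  rw [pvRep1]
  split
  · cases v with
    | nil => exact absurd rfl hv
    | cons a v' => simp
  · simp

-- the key step: running one replace pass first, then scanning with the rest of the
-- table, is the same as scanning with the whole table
theorem pvStep (c₀ : Char) (v₀ : List Char) (R : List (Char × List Char))
    (hc₀ : c₀ ≠ '%') (hv₀ : ∀ ch ∈ v₀, ch ≠ '%') (hne : v₀ ≠ [])
    (hhead : ∀ p ∈ R, v₀.head? ≠ some p.1) (hR : ∀ p ∈ R, p.1 ≠ '%') :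
    ∀ (n : Nat) (s : List Char), s.length ≤ n →
      pvTr R (pvRep1 c₀ v₀ s) = pvTr ((c₀, v₀) :: R) s := by
  intro n
  induction n with
  | zero =>
    intro s hs
    have : s = [] := by cases s <;> simp_all
    subst this; simp [pvRep1, pvTr]
  | succ m ih =>
    intro s hs
    cases s with
    | nil => simp [pvRep1, pvTr]
    | cons x t =>
      by_cases hx : x = '%'
      · subst hx
        cases ht : t.head? with
        | none =>
          have ht0 : t = [] := by cases t <;> simp_all
          subst ht0
          simp [pvRep1, pvTr, pvLookup]
        | some y =>
          obtain ⟨t', rfl⟩ : ∃ t', t = y :: t' := by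
            cases t <;> simp_all
          by_cases hy : y = c₀
          · -- head pair matches
            rw [pvRep1, if_pos ⟨rfl, by simp [hy]⟩]
            rw [pvTr_append_nopct R v₀ hv₀]
            conv_rhs => rw [pvTr]
            have : pvLookup ((c₀, v₀) :: R) '%' ((y :: t').head?) = some v₀ := by
              simp [pvLookup, List.find?, hy]
            rw [this]
            simp only [List.drop_succ_cons, List.drop_zero, List.append_cancel_left_eq]
            exact ih t' (by simp at hs; omega)
          · -- head pair does not match here
            rw [pvRep1, if_neg (by simp [ht, hy])]
            cases hfind : R.find? (fun p => p.1 == y) with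
            | some p =>
              -- a later pair matches: both sides emit p.2
              have hyp : y ≠ '%' := by
                have := List.find?_some hfind
                have hmem := List.mem_of_find?_eq_some hfind
                simp at this; subst this
                exact hR p hmem
              rw [pvRep1, if_neg (by simp [hyp])]
              rw [pvTr]
              have : pvLookup R '%' ((y :: pvRep1 c₀ v₀ t').head?) = some p.2 := by
                simp [pvLookup, hfind]
              rw [this]
              conv_rhs => rw [pvTr]
              have : pvLookup ((c₀, v₀) :: R) '%' ((y :: t').head?) = some p.2 := by
                simp only [pvLookup, List.head?_cons]
                rw [List.find?_cons_of_neg (by simp; exact fun h => hy h.symm)]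
                simp [hfind]
              rw [this]
              simp only [List.drop_succ_cons, List.drop_zero, List.append_cancel_left_eq]
              exact ih t' (by simp at hs; omega)
            | none =>
              -- no pair matches: both sides keep the '%'
              rw [pvTr]
              have : pvLookup R '%' ((pvRep1 c₀ v₀ (y :: t')).head?) = none := by
                rw [pvRep1_head c₀ v₀ hne]
                split
                · cases hv : v₀.head? with
                  | none => simp [pvLookup]
                  | some h =>
                    simp only [pvLookup]
                    cases hfind2 : R.find? (fun p => p.1 == h) with
                    | none => simp
                    | some q =>
                      exfalso
                      have := List.find?_some hfind2
                      have hmem := List.mem_of_find?_eq_some hfind2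
                      simp at this; subst this
                      exact hhead q hmem (by simp [hv])
                · simp [pvLookup, hfind]
              rw [this]
              conv_rhs => rw [pvTr]
              have : pvLookup ((c₀, v₀) :: R) '%' ((y :: t').head?) = none := by
                simp only [pvLookup, List.head?_cons]
                rw [List.find?_cons_of_neg (by simp; exact fun h => hy h.symm)]
                simp [hfind]
              rw [this]
              simp only [List.cons.injEq, true_and]
              exact ih (y :: t') (by simp at hs ⊢; omega)
      · -- ordinary character: copied by both sides
        rw [pvRep1, if_neg (by simp [hx])]
        rw [pvTr]
        have : pvLookup R x ((pvRep1 c₀ v₀ t).head?) = none := by simp [pvLookup, hx]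
        rw [this]
        conv_rhs => rw [pvTr]
        have : pvLookup ((c₀, v₀) :: R) x (t.head?) = none := by simp [pvLookup, hx]
        rw [this]
        simp only [List.cons.injEq, true_and]
        exact ih t (by simp at hs; omega)

-- iterating pvStep down the table
theorem pvChain (T : List (Char × List Char)) (hT : pvGood T) (s : List Char) :
    pvTr [] (T.foldl (fun acc p => pvRep1 p.1 p.2 acc) s) = pvTr T s := by
  induction T generalizing s with
  | nil => simp
  | cons p R ih =>
    obtain ⟨h1, h2, h3, h4, h5, h6⟩ := hT
    calc pvTr [] (((p :: R).foldl (fun acc p => pvRep1 p.1 p.2 acc) s))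
        = pvTr [] (R.foldl (fun acc p => pvRep1 p.1 p.2 acc) (pvRep1 p.1 p.2 s)) := by
          simp
      _ = pvTr R (pvRep1 p.1 p.2 s) := ih h6 (pvRep1 p.1 p.2 s)
      _ = pvTr ((p.1, p.2) :: R) s := pvStep p.1 p.2 R h1 h2 h3 h4 h5 s.length s le_rfl

-- Bool mirror of pvGood, so the concrete table's conditions are checked by evaluation
def pvGoodB : List (Char × List Char) → Bool
  | [] => true
  | (c, v) :: R =>
      (c != '%') && v.all (· != '%') && !v.isEmpty &&
      R.all (fun p => v.head? != some p.1) && R.all (fun p => p.1 != '%') && pvGoodB R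

theorem pvGood_of_b : ∀ T, pvGoodB T = true → pvGood T := by
  intro T
  induction T with
  | nil => intro _; trivial
  | cons p R ih =>
    intro h
    obtain ⟨c, v⟩ := p
    simp only [pvGoodB, Bool.and_eq_true] at h
    have h4 := h.1.1.2
    have h5 := h.1.2
    simp only [List.all_eq_true, bne_iff_ne, ne_eq] at h4 h5
    refine ⟨?_, ?_, ?_, h4, h5, ih h.2⟩ <;> simp_all [List.all_eq_true]

theorem pvGood_table : pvGood pvTokenTable := pvGood_of_b pvTokenTable (by decide)

-- the nine concrete replace passes equal the one-pass scan, for every string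
theorem pvInner_eq (l : List Char) :
    pvTableA.foldl (fun acc kv => PySem.Chars.replace acc kv.1.toList kv.2.toList) l =
      pvTr pvTokenTable l := by
  have h := pvChain pvTokenTable pvGood_table l
  rw [← h, pvTr_nil]
  simp only [pvTableA, pvTokenTable, List.foldl,
    show ("%Y".toList) = ['%', 'Y'] from by decide,
    show ("%y".toList) = ['%', 'y'] from by decide,
    show ("%m".toList) = ['%', 'm'] from by decide,
    show ("%d".toList) = ['%', 'd'] from by decide,
    show ("%H".toList) = ['%', 'H'] from by decide,
    show ("%M".toList) = ['%', 'M'] from by decide,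
    show ("%S".toList) = ['%', 'S'] from by decide,
    show ("%f".toList) = ['%', 'f'] from by decide,
    show ("%z".toList) = ['%', 'z'] from by decide]
  rw [pvReplace_eq_rep1, pvReplace_eq_rep1, pvReplace_eq_rep1, pvReplace_eq_rep1,
    pvReplace_eq_rep1, pvReplace_eq_rep1, pvReplace_eq_rep1, pvReplace_eq_rep1,
    pvReplace_eq_rep1]

-- ===== VERDICT (by name: the statement is the Claim_ definition above) =====
theorem datetime_regexp_builder_spec : Claim_equal_datetime_regexp_builder := by
  intro formats _
  unfold Spec_datetime_regexp_builder datetime_regexp_builder datetime_regexp_builder_alt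
  have hf : (fun (d : PySem.Dict String String) (df : String) =>
      d.insert df (String.ofList
        ((pvTableA.foldl (fun acc kv => PySem.Chars.replace acc kv.1.toList kv.2.toList) df.toList)
          ++ ['$'])))
      = (fun (d : PySem.Dict String String) (df : String) =>
          d.insert df (String.ofList (pvTr pvTokenTable df.toList ++ ['$']))) := by
    funext d df
    rw [pvInner_eq]
  rw [hf]
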